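-- pv_equiv track=rewrite | github.com/Darkoberd00/numerik | src/uebung05/aufgabeKilian.py | genA
-- ===== SOURCE A (Python) =====
-- def genA(n: int):
--     ret = []
--     for i in range(n):
--         ret.append([])
--         current = ret[i]
--         for j in range(n):
--             if (i == j):
--                 current.append(1)
--             elif (j < i):
--                 current.append(-1)
--             elif (j == n-1):
--                 current.append(1)
--             else:
--                 current.append(0)
--
--     return ret
-- ===== SOURCE B (Python) =====
-- def genA(n: int):
--     cols = [[0] * j + [1] + [-1] * (n - 1 - j) for j in range(n - 1)]
--     if n > 0:
--         cols.append([1] * n)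
--     return [list(row) for row in zip(*cols)]
-- ===== Notes on version B (the rewrite author's own statement) =====
-- stated objective: alternative
-- what changed: B builds the matrix column-major (each column as whole run-length segments) and transposes with zip(*cols), instead of A's row-major inner loop with a four-way branch per cell.
import Mathlib
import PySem

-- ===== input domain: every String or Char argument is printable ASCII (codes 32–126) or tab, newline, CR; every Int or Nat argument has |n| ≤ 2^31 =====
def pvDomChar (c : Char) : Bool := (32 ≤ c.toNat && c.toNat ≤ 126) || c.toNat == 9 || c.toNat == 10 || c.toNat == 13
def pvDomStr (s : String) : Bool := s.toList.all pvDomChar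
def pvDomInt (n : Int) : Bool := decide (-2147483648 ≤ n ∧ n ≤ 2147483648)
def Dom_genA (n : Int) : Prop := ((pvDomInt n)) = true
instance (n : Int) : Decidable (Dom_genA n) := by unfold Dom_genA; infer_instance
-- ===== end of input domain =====

-- B builds the matrix column-major (segment columns) and transposes with zip(*cols) instead of A's row-major per-cell branch; objective: alternative.


-- ===== PORT A =====
def genA (n : Int) : List (List Int) :=
  (PySem.List.pyRange 0 n 1).foldl (fun ret i =>
    ret ++ [(PySem.List.pyRange 0 n 1).foldl (fun current j =>
      current ++ [if i = j then 1 else if j < i then -1 else if j = n - 1 then 1 else 0]) []]) []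

-- ===== PORT B =====
-- port of Python's zip(*cols) on a nonempty argument list: stop as soon as any list is exhausted
def pvZipGo (c : List Int) (rest : List (List Int)) : List (List Int) :=
  match c with
  | [] => []
  | x :: xs =>
      if rest.all (fun l => !l.isEmpty) then
        (x :: rest.map (fun l => l.headD 0)) :: pvZipGo xs (rest.map (fun l => l.tail))
      else []

def pvZipStar (cols : List (List Int)) : List (List Int) :=
  match cols with
  | [] => []
  | c :: rest => pvZipGo c rest

def genA_alt (n : Int) : List (List Int) :=
  pvZipStar ((PySem.List.pyRange 0 (n - 1) 1).map (fun j =>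
      List.replicate j.toNat 0 ++ [1] ++ List.replicate (n - 1 - j).toNat (-1))
    ++ (if n > 0 then [List.replicate n.toNat 1] else []))

-- ===== PRECONDITION & SPEC =====
def Spec_genA (n : Int) (out : List (List Int)) : Prop := out = genA_alt n
instance (n : Int) (out : List (List Int)) : Decidable (Spec_genA n out) := by unfold Spec_genA; infer_instance

-- ===== CLAIM (what is proved, stated in full; the proofs are below) =====
def Claim_equal_genA : Prop := ∀ (n : Int), Dom_genA n → Spec_genA n (genA n)

-- ===== LEMMAS AND PROOFS =====

-- zip(*·) on equal-length columns = index-wise transpose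
theorem pvZipGo_eq (c : List Int) (rest : List (List Int))
    (h : ∀ l ∈ rest, l.length = c.length) :
    pvZipGo c rest =
      (List.range c.length).map (fun k => ((c :: rest).map (fun l => l.getD k 0))) := by
  induction c generalizing rest with
  | nil => simp [pvZipGo]
  | cons x xs ih =>
      have hne : rest.all (fun l => !l.isEmpty) = true := by
        rw [List.all_eq_true]
        intro l hl
        have := h l hl
        cases l with
        | nil => simp at this
        | cons a as => simp
      rw [pvZipGo, if_pos hne]
      rw [ih (rest.map (fun l => l.tail)) (by
        intro l hl
        obtain ⟨l', hl', rfl⟩ := List.mem_map.mp hl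
        have := h l' hl'
        simp [List.length_tail, this])]
      rw [List.length_cons, List.range_succ_eq_map]
      simp only [List.map_cons, List.map_map, Function.comp_def]
      congr 1
      · simp only [List.getD_cons_zero]
        congr 1
        apply List.map_congr_left
        intro l hl
        have hl0 : l ≠ [] := by
          have := h l hl; intro he; subst he; simp at this
        cases l with
        | nil => exact absurd rfl hl0
        | cons a as => simp
      · apply List.map_congr_left
        intro k _
        simp only [List.getD_cons_succ]
        congr 1
        apply List.map_congr_left
        intro l hl
        have hl0 : l ≠ [] := by
          have := h l hl; intro he; subst he; simp at this
        cases l with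
        | nil => exact absurd rfl hl0
        | cons a as => simp

-- A's cell value at (i, j)
theorem pv_col_getD (n j : Int) (hj0 : 0 ≤ j) (hj : j < n - 1) (i : Nat) (hi : (i : Int) < n) :
    (List.replicate j.toNat 0 ++ [1] ++ List.replicate (n - 1 - j).toNat (-1 : Int)).getD i 0
      = (if (i : Int) = j then 1 else if j < (i : Int) then -1 else if j = n - 1 then 1 else 0) := by
  by_cases h1 : i < j.toNat
  · rw [List.getD_eq_getElem?_getD, List.getElem?_append_left (by simp; omega),
        List.getElem?_append_left (by simp; omega), List.getElem?_replicate]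
    rw [if_pos h1]
    simp only [Option.getD_some]
    split_ifs <;> omega
  · by_cases h2 : i = j.toNat
    · rw [List.getD_eq_getElem?_getD, List.getElem?_append_left (by simp; omega),
          List.getElem?_append_right (by simp; omega)]
      simp only [List.length_replicate, h2]
      norm_num
      split_ifs <;> omega
    · rw [List.getD_eq_getElem?_getD, List.getElem?_append_right (by simp; omega),
          List.getElem?_replicate]
      rw [if_pos (by simp; omega)]
      simp only [Option.getD_some]
      split_ifs <;> omega

-- ===== VERDICT (by name: the statement is the Claim_ definition above) =====
theorem genA_spec : Claim_equal_genA := by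
  intro n _
  unfold Spec_genA genA genA_alt
  simp only [PySem.List.foldl_append_singleton_eq_map, List.nil_append]
  by_cases hn : n > 0
  · rw [if_pos hn]
    set colFn : Int → List Int := fun j =>
      List.replicate j.toNat 0 ++ [1] ++ List.replicate (n - 1 - j).toNat (-1) with hcolFn
    have hlen : ∀ l ∈ (PySem.List.pyRange 0 (n - 1) 1).map colFn ++ [List.replicate n.toNat 1],
        l.length = n.toNat := by
      intro l hl
      rcases List.mem_append.mp hl with hl | hl
      · obtain ⟨j, hj, rfl⟩ := List.mem_map.mp hl
        rw [PySem.List.mem_pyRange_one] at hj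
        simp [hcolFn]; omega
      · simp at hl; subst hl; simp
    cases hcols : (PySem.List.pyRange 0 (n - 1) 1).map colFn ++ [List.replicate n.toNat 1] with
    | nil => simp at hcols
    | cons c rest =>
        show _ = pvZipGo c rest
        rw [hcols] at hlen
        have hc : c.length = n.toNat := hlen c (by simp)
        rw [pvZipGo_eq c rest (fun l hl => by rw [hlen l (by simp [hl]), hc]), hc, ← hcols]
        rw [PySem.List.pyRange_one]
        simp only [Int.sub_zero, List.map_map, Function.comp_def, zero_add]
        apply List.map_congr_left
        intro i hi
        rw [List.mem_range] at hi
        have hi' : (i : Int) < n := by omega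
        simp only [List.map_append, List.map_map]
        have hsplit : n.toNat = (n - 1).toNat + 1 := by omega
        rw [hsplit, List.range_succ, List.map_append]
        congr 1
        · rw [PySem.List.pyRange_one]
          simp only [Int.sub_zero, List.map_map, Function.comp_def, zero_add]
          apply List.map_congr_left
          intro j hj
          rw [List.mem_range] at hj
          exact (pv_col_getD n (j : Int) (by omega) (by omega) i hi').symm
        · simp only [List.map_cons, List.map_nil]
          rw [List.getD_eq_getElem?_getD, List.getElem?_replicate,
              if_pos (show i < (n - 1).toNat + 1 by omega)]
          simp only [Option.getD_some]
          have h1 : (((n - 1).toNat : Int)) = n - 1 := by omega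
          rw [h1]
          refine congrArg (fun x => [x]) ?_
          split_ifs <;> omega
  · rw [if_neg hn]
    have h1 : PySem.List.pyRange 0 n 1 = [] := by
      rw [PySem.List.pyRange_one]; simp; omega
    have h2 : PySem.List.pyRange 0 (n - 1) 1 = [] := by
      rw [PySem.List.pyRange_one]; simp; omega
    rw [h1, h2]
    simp [pvZipStar]
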